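-- pv_equiv track=rewrite | github.com/sathvik1024/GenAI-Task-Manager | backend/services/ai_service.py | _post_clean_title_english
-- ===== SOURCE A (Python) =====
-- def _post_clean_title_english(title: str) -> str:
--     """Trim trailing priority/deadline hints and reduce length."""
--     if not title:
--         return ""
--     low = title.lower()
--     stop_words = [
--         "by ", "before ", "due ", "deadline", "at ", "on ", "in ", "this ",
--         "priority", "urgent", "high priority", "low priority", "medium priority"
--     ]
--     cut = len(title)
--     for w in stop_words:
--         idx = low.find(w)
--         if idx != -1:
--             cut = min(cut, idx)
--     # keep first clause if still long
--     candidate = title[:cut].split('.')[0].strip()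
--     # enforce shortness (6-8 words)
--     parts = candidate.split()
--     if len(parts) > 8:
--         candidate = " ".join(parts[:8])
--     return candidate.strip(" ,.-")
-- ===== SOURCE B (Python) =====
-- STOP_WORDS = ("by ", "before ", "due ", "deadline", "at ", "on ", "in ", "this ",
--               "priority", "urgent", "high priority", "low priority", "medium priority")
--
--
-- def _post_clean_title_english(title: str) -> str:
--     """Trim trailing priority/deadline hints and reduce length."""
--     if not title:
--         return ""
--     low = title.lower()
--     # single left-to-right scan: cut at the first position where any stop word starts
--     cut = len(title)
--     for i in range(len(low)):
--         if low.startswith(STOP_WORDS, i):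
--             cut = i
--             break
--     candidate = title[:cut].split('.')[0].strip()
--     parts = candidate.split()
--     if len(parts) > 8:
--         candidate = " ".join(parts[:8])
--     return candidate.strip(" ,.-")
-- ===== Notes on version B (the rewrite author's own statement) =====
-- stated objective: alternative
-- what changed: A runs str.find once per stop word and takes the minimum of the hit positions; B makes a single left-to-right scan over the lowercased title and cuts at the first position where any stop word starts (startswith with a start index), the per-word find loop disappearing.
import Mathlib
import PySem

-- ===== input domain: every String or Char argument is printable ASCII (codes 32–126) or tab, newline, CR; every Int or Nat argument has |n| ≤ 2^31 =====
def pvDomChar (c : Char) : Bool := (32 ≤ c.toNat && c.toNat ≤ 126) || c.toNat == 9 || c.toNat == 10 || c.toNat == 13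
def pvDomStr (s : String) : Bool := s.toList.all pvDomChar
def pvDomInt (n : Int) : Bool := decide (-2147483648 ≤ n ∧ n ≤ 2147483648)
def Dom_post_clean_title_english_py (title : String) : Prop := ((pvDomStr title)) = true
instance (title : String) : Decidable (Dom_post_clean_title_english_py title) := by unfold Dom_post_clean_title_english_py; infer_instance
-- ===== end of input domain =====

-- B replaces A's per-word repeated find scans by a single left-to-right scan that stops at
-- the first position where any stop word starts (objective: alternative, same result).

-- the stop-word list (identical literal in both Pythons)
def pvStopWords : List String :=
  ["by ", "before ", "due ", "deadline", "at ", "on ", "in ", "this ",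
   "priority", "urgent", "high priority", "low priority", "medium priority"]

-- ===== PORT A =====
def post_clean_title_english_py (title : String) : String :=
  if title = "" then ""
  else
    let low := PySem.Str.lower title
    let cut : Int := pvStopWords.foldl (fun cut w =>
      let idx := PySem.Str.find low w
      if idx ≠ -1 then min cut idx else cut) (PySem.Str.len title)
    let candidate := PySem.Str.strip
      (PySem.List.pyGetD ((PySem.Str.split? (PySem.Str.slice title none (some cut)) ".").getD []) 0 "")
    let parts := PySem.Str.split₀ candidate
    let candidate := if 8 < (parts.length : Int) then PySem.Str.join " " (PySem.List.slice parts none (some 8)) else candidate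
    PySem.Str.stripChars candidate " ,.-"

-- ===== PORT B =====
-- port of Source B's scan loop: `low.startswith(STOP_WORDS, i)` is checked, exactly, as
-- "some stop word is a prefix of the suffix of low starting at i" (char-level, ASCII-exact)
def pvScanCut (ws : List String) (i : Nat) (t : List Char) : Nat :=
  match t with
  | [] => i
  | c :: rest =>
      if ws.any (fun w => PySem.Chars.startswith (c :: rest) w.toList) then i
      else pvScanCut ws (i + 1) rest

def post_clean_title_english_py_alt (title : String) : String :=
  if title = "" then ""
  else
    let low := PySem.Str.lower title
    let cut : Int := (pvScanCut pvStopWords 0 low.toList : Int)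
    let candidate := PySem.Str.strip
      (PySem.List.pyGetD ((PySem.Str.split? (PySem.Str.slice title none (some cut)) ".").getD []) 0 "")
    let parts := PySem.Str.split₀ candidate
    let candidate := if 8 < (parts.length : Int) then PySem.Str.join " " (PySem.List.slice parts none (some 8)) else candidate
    PySem.Str.stripChars candidate " ,.-"

-- ===== PRECONDITION & SPEC =====
def Spec_post_clean_title_english_py (title : String) (out : String) : Prop := out = post_clean_title_english_py_alt title
instance (title : String) (out : String) : Decidable (Spec_post_clean_title_english_py title out) := by unfold Spec_post_clean_title_english_py; infer_instance

-- ===== CLAIM (what is proved, stated in full; the proofs are below) =====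
def Claim_equal_post_clean_title_english_py : Prop := ∀ (title : String), Dom_post_clean_title_english_py title → Spec_post_clean_title_english_py title (post_clean_title_english_py title)

-- ===== LEMMAS AND PROOFS =====

-- A's fold, named for the proofs (same function as in the port, bridged to Chars.find)
def pvFold (s : List Char) (ws : List String) (a : Int) : Int :=
  ws.foldl (fun cut w =>
    if PySem.Chars.find s w.toList ≠ -1 then min cut (PySem.Chars.find s w.toList) else cut) a

lemma pvFold_cons (s : List Char) (w : String) (ws : List String) (a : Int) :
    pvFold s (w :: ws) a
      = pvFold s ws (if PySem.Chars.find s w.toList ≠ -1 then min a (PySem.Chars.find s w.toList) else a) := rfl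

lemma pvFold_le (s : List Char) (ws : List String) (a : Int) : pvFold s ws a ≤ a := by
  induction ws generalizing a with
  | nil => simp [pvFold]
  | cons w ws ih =>
    rw [pvFold_cons]
    refine le_trans (ih _) ?_
    split_ifs
    · exact min_le_left _ _
    · exact le_refl a

lemma pvFold_le_find (s : List Char) (ws : List String) (a : Int) (w : String)
    (hw : w ∈ ws) (h : PySem.Chars.find s w.toList ≠ -1) :
    pvFold s ws a ≤ PySem.Chars.find s w.toList := by
  induction ws generalizing a with
  | nil => cases hw
  | cons v ws ih =>
    rcases List.mem_cons.mp hw with rfl | hw'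
    · rw [pvFold_cons, if_pos h]
      exact le_trans (pvFold_le s ws _) (min_le_right _ _)
    · rw [pvFold_cons]; exact ih _ hw'

lemma pvFold_cases (s : List Char) (ws : List String) (a : Int) :
    pvFold s ws a = a ∨
      ∃ w ∈ ws, pvFold s ws a = PySem.Chars.find s w.toList ∧ PySem.Chars.find s w.toList ≠ -1 := by
  induction ws generalizing a with
  | nil => left; simp [pvFold]
  | cons w ws ih =>
    rw [pvFold_cons]
    split_ifs with h
    · rcases ih (min a (PySem.Chars.find s w.toList)) with heq | ⟨v, hv, hveq⟩
      · rcases min_cases a (PySem.Chars.find s w.toList) with ⟨hm, _⟩ | ⟨hm, _⟩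
        · left; rw [heq, hm]
        · right; exact ⟨w, List.mem_cons_self, by rw [heq, hm], h⟩
      · right; exact ⟨v, List.mem_cons_of_mem _ hv, hveq⟩
    · rcases ih a with heq | ⟨v, hv, hveq⟩
      · left; exact heq
      · right; exact ⟨v, List.mem_cons_of_mem _ hv, hveq⟩

-- a prefix of a suffix of s is an infix of s
lemma pvPrefix_drop_infix {w s : List Char} {j : Nat} (h : w <+: s.drop j) : w <:+: s :=
  List.IsInfix.trans h.isInfix (List.drop_suffix j s).isInfix

-- no stop word occurs strictly before A's cut
lemma pvFold_min (s : List Char) (ws : List String) (a : Int) (j : Nat)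
    (hj : (j : Int) < pvFold s ws a) :
    ¬ ∃ w ∈ ws, w.toList <+: s.drop j := by
  rintro ⟨w, hw, hpre⟩
  by_cases h : PySem.Chars.find s w.toList = -1
  · exact (PySem.Chars.find_eq_neg_one_iff s w.toList).mp h (pvPrefix_drop_infix hpre)
  · have hle := pvFold_le_find s ws a w hw h
    have hnn : 0 ≤ PySem.Chars.find s w.toList :=
      (PySem.Chars.find_nonneg_iff s w.toList).mpr ((PySem.Chars.find_ne_neg_one_iff s w.toList).mp h)
    have hspec := (PySem.Chars.find_spec hnn).2 j (by omega)
    exact hspec hpre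

lemma pvScanCut_lb (ws : List String) (t : List Char) (i : Nat) : i ≤ pvScanCut ws i t := by
  induction t generalizing i with
  | nil => simp [pvScanCut]
  | cons c rest ih =>
    simp only [pvScanCut]
    split_ifs
    · exact le_refl i
    · exact le_trans (Nat.le_succ i) (ih (i + 1))

lemma pvScanCut_ub (ws : List String) (t : List Char) (i : Nat) :
    pvScanCut ws i t ≤ i + t.length := by
  induction t generalizing i with
  | nil => simp [pvScanCut]
  | cons c rest ih =>
    simp only [pvScanCut]
    split_ifs
    · simp
    · have := ih (i + 1); simp only [List.length_cons]; omega

lemma pvScanCut_cases (ws : List String) (t : List Char) (i : Nat) :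
    pvScanCut ws i t = i + t.length ∨
      ∃ w ∈ ws, w.toList <+: t.drop (pvScanCut ws i t - i) := by
  induction t generalizing i with
  | nil => left; simp [pvScanCut]
  | cons c rest ih =>
    by_cases h : ws.any (fun w => PySem.Chars.startswith (c :: rest) w.toList) = true
    · right
      rcases List.any_eq_true.mp h with ⟨w, hw, hsw⟩
      refine ⟨w, hw, ?_⟩
      have hs : pvScanCut ws i (c :: rest) = i := by simp [pvScanCut, h]
      rw [hs]
      simpa using (PySem.Chars.startswith_iff _ _).mp hsw
    · have hs : pvScanCut ws i (c :: rest) = pvScanCut ws (i + 1) rest := by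
        simp [pvScanCut, h]
      rcases ih (i + 1) with heq | ⟨w, hw, hpre⟩
      · left; rw [hs, heq]; simp only [List.length_cons]; omega
      · right
        refine ⟨w, hw, ?_⟩
        have hlb := pvScanCut_lb ws rest (i + 1)
        rw [hs]
        have hdr : (c :: rest).drop (pvScanCut ws (i + 1) rest - i)
            = rest.drop (pvScanCut ws (i + 1) rest - (i + 1)) := by
          have h1 : pvScanCut ws (i + 1) rest - i = (pvScanCut ws (i + 1) rest - (i + 1)) + 1 := by omega
          rw [h1]; simp [List.drop_succ_cons]
        rw [hdr]; exact hpre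

lemma pvScanCut_min (ws : List String) (t : List Char) (i j : Nat)
    (hij : i ≤ j) (hj : j < pvScanCut ws i t) :
    ¬ ∃ w ∈ ws, w.toList <+: t.drop (j - i) := by
  induction t generalizing i j with
  | nil => simp [pvScanCut] at hj; omega
  | cons c rest ih =>
    by_cases h : ws.any (fun w => PySem.Chars.startswith (c :: rest) w.toList) = true
    · simp [pvScanCut, h] at hj; omega
    · have hs : pvScanCut ws i (c :: rest) = pvScanCut ws (i + 1) rest := by
        simp [pvScanCut, h]
      rw [hs] at hj
      rcases Nat.eq_or_lt_of_le hij with rfl | hlt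
      · simp only [Nat.sub_self, List.drop_zero]
        rintro ⟨w, hw, hpre⟩
        have hall := List.any_eq_false.mp (by simpa using h) w hw
        exact hall ((PySem.Chars.startswith_iff _ _).mpr hpre)
      · have hmain := ih (i + 1) j hlt hj
        have hdr : (c :: rest).drop (j - i) = rest.drop (j - (i + 1)) := by
          have h1 : j - i = (j - (i + 1)) + 1 := by omega
          rw [h1]; simp [List.drop_succ_cons]
        rw [hdr]; exact hmain

-- the two cut computations agree
set_option maxHeartbeats 800000 in
lemma pvCut_eq (title : String) :
    pvStopWords.foldl (fun cut w =>
      let idx := PySem.Str.find (PySem.Str.lower title) w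
      if idx ≠ -1 then min cut idx else cut) (PySem.Str.len title)
    = ((pvScanCut pvStopWords 0 (PySem.Str.lower title).toList : Nat) : Int) := by
  have hlen : (PySem.Str.lower title).toList.length = title.toList.length := by
    rw [PySem.Str.toList_lower]; simp [PySem.Chars.lower]
  have hA : pvStopWords.foldl (fun cut w =>
      let idx := PySem.Str.find (PySem.Str.lower title) w
      if idx ≠ -1 then min cut idx else cut) (PySem.Str.len title)
      = pvFold (PySem.Str.lower title).toList pvStopWords
          (((PySem.Str.lower title).toList.length : Nat) : Int) := by
    unfold pvFold
    simp only [PySem.Str.find_eq, PySem.Str.len_eq, hlen]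
  rw [hA]
  generalize (PySem.Str.lower title).toList = s
  set cA := pvFold s pvStopWords ((s.length : Nat) : Int) with hcA
  set r := pvScanCut pvStopWords 0 s with hr
  have hAub : cA ≤ (s.length : Int) := pvFold_le s pvStopWords _
  have hAlb : 0 ≤ cA := by
    rcases pvFold_cases s pvStopWords ((s.length : Nat) : Int) with heq | ⟨w, _, heq, hne⟩
    · rw [hcA, heq]; positivity
    · rw [hcA, heq]
      exact (PySem.Chars.find_nonneg_iff s w.toList).mpr ((PySem.Chars.find_ne_neg_one_iff s w.toList).mp hne)
  have hrub : r ≤ s.length := by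
    have := pvScanCut_ub pvStopWords s 0
    omega
  rcases lt_trichotomy cA ((r : Nat) : Int) with hlt | heq | hgt
  · exfalso
    rcases pvFold_cases s pvStopWords ((s.length : Nat) : Int) with heq | ⟨w, hw, heq, hne⟩
    · rw [hcA, heq] at hlt
      omega
    · have heqA : cA = PySem.Chars.find s w.toList := by rw [hcA, heq]
      have hnn : 0 ≤ PySem.Chars.find s w.toList := heqA ▸ hAlb
      have hpre := (PySem.Chars.find_spec hnn).1
      have hj : cA.toNat < r := by omega
      have hmin := pvScanCut_min pvStopWords s 0 cA.toNat (Nat.zero_le _) (by omega)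
      refine hmin ⟨w, hw, ?_⟩
      have : (PySem.Chars.find s w.toList).toNat = cA.toNat := by rw [heqA]
      rw [this] at hpre
      simpa using hpre
  · exact heq
  · exfalso
    have hrlt : r < s.length := by omega
    rcases pvScanCut_cases pvStopWords s 0 with heq | ⟨w, hw, hpre⟩
    · rw [← hr] at heq; omega
    · have hmin := pvFold_min s pvStopWords ((s.length : Nat) : Int) r (by omega)
      refine hmin ⟨w, hw, ?_⟩
      simpa using hpre

-- ===== VERDICT (by name: the statement is the Claim_ definition above) =====
theorem post_clean_title_english_py_spec : Claim_equal_post_clean_title_english_py := by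
  intro title _
  unfold Spec_post_clean_title_english_py
  unfold post_clean_title_english_py post_clean_title_english_py_alt
  by_cases h : title = ""
  · simp [h]
  · simp only [if_neg h]
    rw [pvCut_eq title]
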